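-- pv_equiv track=rewrite | github.com/tsuru7/algorithm-study | AtCoder/ABC281/B.py | solve
-- ===== SOURCE A (Python) =====
-- from collections import Counter
--
-- def solve(s):
--     n = len(s)
--     if n != 8:
--         return 'No'
--     head = s[0]
--     between = s[1:-1]
--     counter = Counter(between)
--     tmp = 0
--     for c in '1234567890':
--         tmp += counter[c]
--     if tmp != 6:
--         return 'No'
--     tail = s[-1]
--     if ord('A') <= ord(head) <= ord('Z') and 100000 <= int(between) <= 999999 and ord('A') <= ord(tail) <= ord('Z'):
--         return 'Yes'
--     else:
--         return 'No'
-- ===== SOURCE B (Python) =====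
-- def solve(s):
--     if len(s) != 8:
--         return 'No'
--     classes = {0: ('A', 'Z'), 7: ('A', 'Z')}
--     for i, c in enumerate(s):
--         lo, hi = classes.get(i, ('0', '9'))
--         if not (lo <= c <= hi):
--             return 'No'
--     return 'Yes' if 100000 <= int(s[1:7]) <= 999999 else 'No'
-- ===== Notes on version B (the rewrite author's own statement) =====
-- stated objective: alternative
-- what changed: Replaces the slice/Counter-histogram/ord staging with a table-driven matcher: one pass over enumerate(s) checks every position against a class table (uppercase at positions 0 and 7, digit elsewhere), followed by a single numeric range check on the middle.
import Mathlib
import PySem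

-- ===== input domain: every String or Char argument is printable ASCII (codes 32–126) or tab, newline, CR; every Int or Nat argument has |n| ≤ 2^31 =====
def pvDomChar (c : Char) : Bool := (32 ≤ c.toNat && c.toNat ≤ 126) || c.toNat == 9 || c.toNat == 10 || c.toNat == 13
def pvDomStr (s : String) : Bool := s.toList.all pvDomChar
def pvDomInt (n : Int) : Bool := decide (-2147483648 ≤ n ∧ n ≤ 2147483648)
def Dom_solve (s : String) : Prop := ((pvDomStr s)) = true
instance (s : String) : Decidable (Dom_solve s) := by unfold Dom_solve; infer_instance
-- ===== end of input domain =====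

-- B replaces A's slice/Counter-histogram/ord staging with a table-driven matcher
-- (a per-position class table checked in one pass over enumerate(s), then one
-- numeric range check): a different decomposition of the same O(n) validation.

-- ===== PORT A =====
def solve (s : String) : String :=
  let n : Int := PySem.Str.len s
  if n ≠ 8 then "No"
  else
    match PySem.Str.pyGet? s 0 with
    | none => "No"  -- unreachable: n = 8, so s[0] exists
    | some head =>
      let between : List Char := PySem.Chars.slice s.toList (some 1) (some (-1))
      let counter : PySem.Dict Char Int := PySem.Dict.counter between
      let tmp : Int :=
        ("1234567890".toList).foldl (fun acc c => acc + counter.getD c 0) 0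
      if tmp ≠ 6 then "No"
      else
        match PySem.Str.pyGet? s (-1) with
        | none => "No"  -- unreachable: n = 8, so s[-1] exists
        | some tail =>
          match PySem.Int.ofChars? between with
          | none => "No"  -- unreachable: tmp = 6 forces six digit chars, int() succeeds
          | some v =>
            if ('A'.toNat ≤ head.toNat ∧ head.toNat ≤ 'Z'.toNat) ∧
               (100000 ≤ v ∧ v ≤ 999999) ∧
               ('A'.toNat ≤ tail.toNat ∧ tail.toNat ≤ 'Z'.toNat)
            then "Yes" else "No"

-- ===== PORT B =====
-- the class table {0: ('A','Z'), 7: ('A','Z')} of Source B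
def solveAltClasses : PySem.Dict Int (Char × Char) :=
  PySem.Dict.ofList [((0 : Int), ('A', 'Z')), ((7 : Int), ('A', 'Z'))]

-- the `for i, c in enumerate(s)` loop of Source B: early 'No' = false, fall-through = true
def solveAltLoop (classes : PySem.Dict Int (Char × Char)) : List (Int × Char) → Bool
  | [] => true
  | (i, c) :: rest =>
    let p := classes.getD i ('0', '9')
    if ¬ (p.1 ≤ c ∧ c ≤ p.2) then false
    else solveAltLoop classes rest

def solve_alt (s : String) : String :=
  if PySem.Str.len s ≠ 8 then "No"
  else if solveAltLoop solveAltClasses (PySem.List.enumerate s.toList) = false then "No"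
  else
    match PySem.Int.ofChars? (PySem.Chars.slice s.toList (some 1) (some 7)) with
    | none => "No"  -- unreachable: the class loop guarantees six digit chars
    | some v => if 100000 ≤ v ∧ v ≤ 999999 then "Yes" else "No"

-- ===== PRECONDITION & SPEC =====
def Spec_solve (s : String) (out : String) : Prop := out = solve_alt s
instance (s : String) (out : String) : Decidable (Spec_solve s out) := by unfold Spec_solve; infer_instance

-- ===== CLAIM (what is proved, stated in full; the proofs are below) =====
def Claim_equal_solve : Prop := ∀ (s : String), Dom_solve s → Spec_solve s (solve s)

-- ===== LEMMAS AND PROOFS =====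

theorem mem_digits_of_isdigit (c : Char) (h : PySem.Chars.isdigit c = true) :
    c ∈ ['1','2','3','4','5','6','7','8','9','0'] := by
  simp only [PySem.Chars.isdigit, Bool.and_eq_true, decide_eq_true_eq] at h
  obtain ⟨h1, h2⟩ := h
  rw [Char.le_def] at h1 h2
  have h1' : 48 ≤ c.toNat := by exact_mod_cast UInt32.le_iff_toNat_le.mp h1
  have h2' : c.toNat ≤ 57 := by exact_mod_cast UInt32.le_iff_toNat_le.mp h2
  have key : ∀ d : Char, c.toNat = d.toNat → c = d := by
    intro d hd
    exact Char.ext (UInt32.toNat_inj.mp hd)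
  interval_cases h : c.toNat <;>
    first
      | simp [key '0' (by decide)] | simp [key '1' (by decide)] | simp [key '2' (by decide)]
      | simp [key '3' (by decide)] | simp [key '4' (by decide)] | simp [key '5' (by decide)]
      | simp [key '6' (by decide)] | simp [key '7' (by decide)] | simp [key '8' (by decide)]
      | simp [key '9' (by decide)]

-- one character's contribution to A's ten-digit count loop is 1 for a digit, else 0
theorem sum_indicator_digits (x : Char) :
    ((['1','2','3','4','5','6','7','8','9','0'].map
        (fun d => if (x == d) = true then (1 : Int) else 0)).sum) =
      if PySem.Chars.isdigit x = true then 1 else 0 := by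
  by_cases hd : PySem.Chars.isdigit x = true
  · have hmem := mem_digits_of_isdigit x hd
    simp only [List.mem_cons, List.not_mem_nil, or_false] at hmem
    rcases hmem with rfl | rfl | rfl | rfl | rfl | rfl | rfl | rfl | rfl | rfl <;> decide
  · have hne : ∀ d ∈ ['1','2','3','4','5','6','7','8','9','0'], (x == d) = false := by
      intro d hdm
      cases h' : x == d
      · rfl
      · exfalso
        have : x = d := by exact beq_iff_eq.mp h'
        subst this
        exact hd (by
          simp only [List.mem_cons, List.not_mem_nil, or_false] at hdm
          rcases hdm with rfl | rfl | rfl | rfl | rfl | rfl | rfl | rfl | rfl | rfl <;> decide)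
    simp only [List.map, List.sum_cons, List.sum_nil]
    rw [hne '1' (by simp), hne '2' (by simp), hne '3' (by simp), hne '4' (by simp),
        hne '5' (by simp), hne '6' (by simp), hne '7' (by simp), hne '8' (by simp),
        hne '9' (by simp), hne '0' (by simp)]
    simp [hd]

-- A's histogram sum over the ten digit characters is the number of digit characters
theorem sum_counts_eq_countP (xs : List Char) :
    ((['1','2','3','4','5','6','7','8','9','0'].map
        (fun d => (List.count d xs : Int))).sum) =
      (xs.countP PySem.Chars.isdigit : Int) := by
  induction xs with
  | nil => simp
  | cons x xs ih =>
    simp only [List.count_cons, List.countP_cons]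
    push_cast
    rw [List.sum_map_add]
    rw [ih]
    have := sum_indicator_digits x
    by_cases hd : PySem.Chars.isdigit x = true <;> simp_all

theorem tmp_eq_countP (between : List Char) :
    ("1234567890".toList).foldl
        (fun acc c => acc + (PySem.Dict.counter between).getD c 0) 0 =
      (between.countP PySem.Chars.isdigit : Int) := by
  simp only [PySem.Dict.getD_counter]
  rw [PySem.List.foldl_add]
  have h10 : "1234567890".toList = ['1','2','3','4','5','6','7','8','9','0'] := rfl
  rw [h10, zero_add, sum_counts_eq_countP]

theorem char_le_iff (c d : Char) : c ≤ d ↔ c.toNat ≤ d.toNat := by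
  rw [Char.le_def]
  exact UInt32.le_iff_toNat_le

theorem isdigit_iff (c : Char) : PySem.Chars.isdigit c = true ↔ ('0' ≤ c ∧ c ≤ '9') := by
  simp [PySem.Chars.isdigit]

theorem countP6_eq_six_iff (l : List Char) (hl : l.length = 6) :
    ((l.countP PySem.Chars.isdigit : Int) = 6) ↔ (∀ x ∈ l, PySem.Chars.isdigit x = true) := by
  constructor
  · intro hc
    have hcn : l.countP PySem.Chars.isdigit = l.length := by omega
    exact List.countP_eq_length.mp hcn
  · intro hd
    rw [List.countP_eq_length.mpr hd, hl]
    norm_num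

-- ===== VERDICT (by name: the statement is the Claim_ definition above) =====
set_option maxHeartbeats 1600000 in
theorem solve_spec : Claim_equal_solve := by
  intro s _
  unfold Spec_solve solve solve_alt
  by_cases h8 : s.toList.length = 8
  · obtain ⟨a, b, c, d, e, f, g, h, hl⟩ :
        ∃ a b c d e f g h, s.toList = [a, b, c, d, e, f, g, h] := by
      rcases hs : s.toList with
          _ | ⟨a, _ | ⟨b, _ | ⟨c, _ | ⟨d, _ | ⟨e, _ | ⟨f, _ | ⟨g, _ | ⟨h, _ | ⟨i, t⟩⟩⟩⟩⟩⟩⟩⟩⟩ <;>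
        first
          | (exact ⟨a, b, c, d, e, f, g, h, rfl⟩)
          | (exfalso; simp [hs] at h8)
    have hlen : PySem.Str.len s = 8 := by simp [PySem.Str.len, hl]
    have hget0 : PySem.Str.pyGet? s 0 = some a := by
      simp [PySem.Str.pyGet?, hl, PySem.List.pyGet?, PySem.List.pyIdx?]
    have hgetm1 : PySem.Str.pyGet? s (-1) = some h := by
      simp [PySem.Str.pyGet?, hl, PySem.List.pyGet?, PySem.List.pyIdx?]
    have hsliceA : PySem.Chars.slice s.toList (some 1) (some (-1)) = [b, c, d, e, f, g] := by
      simp [hl, PySem.Chars.slice_eq_listSlice, PySem.List.slice, PySem.List.clampIdx]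
    have hsliceB : PySem.Chars.slice s.toList (some 1) (some 7) = [b, c, d, e, f, g] := by
      simp [hl, PySem.Chars.slice_eq_listSlice, PySem.List.slice, PySem.List.clampIdx]
    have henum : PySem.List.enumerate s.toList =
        [(0, a), (1, b), (2, c), (3, d), (4, e), (5, f), (6, g), (7, h)] := by
      simp [hl, PySem.List.enumerate_cons]
    have hloop : (solveAltLoop solveAltClasses (PySem.List.enumerate s.toList) = true) ↔
        (('A' ≤ a ∧ a ≤ 'Z') ∧ (∀ x ∈ [b, c, d, e, f, g], PySem.Chars.isdigit x = true) ∧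
          ('A' ≤ h ∧ h ≤ 'Z')) := by
      rw [henum]
      have h0 : solveAltClasses.getD (0 : Int) ('0', '9') = ('A', 'Z') := by decide
      have h1 : solveAltClasses.getD (1 : Int) ('0', '9') = ('0', '9') := by decide
      have h2 : solveAltClasses.getD (2 : Int) ('0', '9') = ('0', '9') := by decide
      have h3 : solveAltClasses.getD (3 : Int) ('0', '9') = ('0', '9') := by decide
      have h4 : solveAltClasses.getD (4 : Int) ('0', '9') = ('0', '9') := by decide
      have h5 : solveAltClasses.getD (5 : Int) ('0', '9') = ('0', '9') := by decide
      have h6 : solveAltClasses.getD (6 : Int) ('0', '9') = ('0', '9') := by decide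
      have h7 : solveAltClasses.getD (7 : Int) ('0', '9') = ('A', 'Z') := by decide
      simp only [solveAltLoop, h0, h1, h2, h3, h4, h5, h6, h7, List.mem_cons,
        List.not_mem_nil, or_false, isdigit_iff]
      split_ifs <;> simp_all
    simp only [hlen, hget0, hgetm1, hsliceA, hsliceB]
    rw [tmp_eq_countP]
    by_cases hdig : ∀ x ∈ [b, c, d, e, f, g], PySem.Chars.isdigit x = true
    · have htmp : (([b, c, d, e, f, g].countP PySem.Chars.isdigit : Nat) : Int) = 6 :=
        (countP6_eq_six_iff _ (by simp)).mpr hdig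
      by_cases hends : ('A' ≤ a ∧ a ≤ 'Z') ∧ ('A' ≤ h ∧ h ≤ 'Z')
      · have hloopT : solveAltLoop solveAltClasses (PySem.List.enumerate s.toList) = true := by
          rw [hloop]; exact ⟨hends.1, hdig, hends.2⟩
        have hloopF : ¬ (solveAltLoop solveAltClasses (PySem.List.enumerate s.toList) = false) := by
          simp [hloopT]
        cases hv : PySem.Int.ofChars? [b, c, d, e, f, g] with
        | none => simp [htmp, hloopF]
        | some v =>
          have ha' : 'A'.toNat ≤ a.toNat ∧ a.toNat ≤ 'Z'.toNat := by
            constructor <;> [exact (char_le_iff _ _).mp hends.1.1; exact (char_le_iff _ _).mp hends.1.2]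
          have hh' : 'A'.toNat ≤ h.toNat ∧ h.toNat ≤ 'Z'.toNat := by
            constructor <;> [exact (char_le_iff _ _).mp hends.2.1; exact (char_le_iff _ _).mp hends.2.2]
          simp only [htmp, hloopF, ne_eq, not_true_eq_false, if_false]
          split_ifs with hr1 hr2 hr2 <;> first | rfl | (exfalso; tauto)
      · have hloopF : solveAltLoop solveAltClasses (PySem.List.enumerate s.toList) = false := by
          cases hb : solveAltLoop solveAltClasses (PySem.List.enumerate s.toList)
          · rfl
          · exfalso
            have := hloop.mp hb
            exact hends ⟨this.1, this.2.2⟩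
        have hends' : ¬ (('A'.toNat ≤ a.toNat ∧ a.toNat ≤ 'Z'.toNat) ∧
            ('A'.toNat ≤ h.toNat ∧ h.toNat ≤ 'Z'.toNat)) := by
          intro hc
          exact hends ⟨⟨(char_le_iff _ _).mpr hc.1.1, (char_le_iff _ _).mpr hc.1.2⟩,
            ⟨(char_le_iff _ _).mpr hc.2.1, (char_le_iff _ _).mpr hc.2.2⟩⟩
        cases hv : PySem.Int.ofChars? [b, c, d, e, f, g] with
        | none => simp [htmp, hloopF]
        | some v =>
          simp only [htmp, hloopF, ne_eq, not_true_eq_false, if_false, if_true]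
          split_ifs with hr <;> first | rfl | (exfalso; tauto)
    · have htmp : ¬ ((([b, c, d, e, f, g].countP PySem.Chars.isdigit : Nat) : Int) = 6) := by
        intro hc
        exact hdig ((countP6_eq_six_iff _ (by simp)).mp hc)
      have hloopF : solveAltLoop solveAltClasses (PySem.List.enumerate s.toList) = false := by
        cases hb : solveAltLoop solveAltClasses (PySem.List.enumerate s.toList)
        · rfl
        · exact absurd (hloop.mp hb).2.1 hdig
      simp [htmp, hloopF]
  · have hT : s.toList.length = s.length := String.length_toList
    have h8' : ¬ ((s.length : Int) = 8) := by omega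
    simp [PySem.Str.len, h8']
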